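-- pv_equiv track=rewrite | github.com/idyWilliams/teamIQ | backend/app/routes/analytics.py | _generate_blocker_recommendations
-- ===== SOURCE A (Python) =====
-- def _generate_blocker_recommendations(blockers):
--     """Generate recommendations based on detected blockers."""
--     recommendations = []
--
--     if not blockers:
--         return ["No blockers detected. Team communication appears healthy."]
--
--     # Categorize blockers
--     technical_blockers = [b for b in blockers if b.get("type") == "technical"]
--     process_blockers = [b for b in blockers if b.get("type") == "process"]
--     communication_blockers = [b for b in blockers if b.get("type") == "communication"]
--
--     if technical_blockers:
--         recommendations.append(f"Address {len(technical_blockers)} technical blockers through code reviews and pair programming")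
--
--     if process_blockers:
--         recommendations.append(f"Review and improve processes to resolve {len(process_blockers)} process-related blockers")
--
--     if communication_blockers:
--         recommendations.append(f"Enhance team communication to address {len(communication_blockers)} communication issues")
--
--     # High severity blockers
--     high_severity = [b for b in blockers if b.get("severity") == "high"]
--     if high_severity:
--         recommendations.append(f"Immediate attention required for {len(high_severity)} high-severity blockers")
--
--     return recommendations
-- ===== SOURCE B (Python) =====
-- def _generate_blocker_recommendations(blockers):
--     """Single pass: maintain a count table, then emit from counts."""
--     if not blockers:
--         return ["No blockers detected. Team communication appears healthy."]
--
--     technical = process = communication = high = 0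
--     for b in blockers:
--         t = b.get("type")
--         if t == "technical":
--             technical += 1
--         elif t == "process":
--             process += 1
--         elif t == "communication":
--             communication += 1
--         if b.get("severity") == "high":
--             high += 1
--
--     recommendations = []
--     if technical:
--         recommendations.append(f"Address {technical} technical blockers through code reviews and pair programming")
--     if process:
--         recommendations.append(f"Review and improve processes to resolve {process} process-related blockers")
--     if communication:
--         recommendations.append(f"Enhance team communication to address {communication} communication issues")
--     if high:
--         recommendations.append(f"Immediate attention required for {high} high-severity blockers")
--     return recommendations
-- ===== Notes on version B (the rewrite author's own statement) =====
-- stated objective: simpler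
-- what changed: Replaces A's four separate list-comprehension scans (building intermediate filtered lists only to take their len) with one pass that maintains a count table of four counters, then emits the recommendation strings from the counts.
import Mathlib
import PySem

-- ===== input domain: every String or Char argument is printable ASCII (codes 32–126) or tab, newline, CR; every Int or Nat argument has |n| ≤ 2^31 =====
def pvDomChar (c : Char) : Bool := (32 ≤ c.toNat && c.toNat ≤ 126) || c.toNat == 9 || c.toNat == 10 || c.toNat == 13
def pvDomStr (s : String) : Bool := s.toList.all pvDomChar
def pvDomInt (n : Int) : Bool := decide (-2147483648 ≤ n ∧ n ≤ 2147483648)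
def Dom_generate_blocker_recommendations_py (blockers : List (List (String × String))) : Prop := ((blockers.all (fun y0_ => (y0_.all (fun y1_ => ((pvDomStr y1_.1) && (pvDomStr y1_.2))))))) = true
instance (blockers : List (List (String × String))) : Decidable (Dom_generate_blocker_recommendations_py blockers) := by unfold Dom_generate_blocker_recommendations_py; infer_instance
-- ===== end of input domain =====

-- B replaces A's four filtering scans with one counting pass plus emission from the counts (objective: simpler).

-- ===== PORT A =====
-- b.get(k) for a dict argument (assoc list under the type convention)
def pvDget (b : List (String × String)) (k : String) : Option String :=
  (PySem.Dict.mk b).get? k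

def generate_blocker_recommendations_py (blockers : List (List (String × String))) : List String :=
  if blockers = [] then
    ["No blockers detected. Team communication appears healthy."]
  else
    let technical_blockers := blockers.filter (fun b => pvDget b "type" == some "technical")
    let process_blockers := blockers.filter (fun b => pvDget b "type" == some "process")
    let communication_blockers := blockers.filter (fun b => pvDget b "type" == some "communication")
    let recommendations : List String := []
    let recommendations :=
      if technical_blockers ≠ [] then
        recommendations ++ ["Address " ++ PySem.Int.toStr (technical_blockers.length : Int) ++ " technical blockers through code reviews and pair programming"]
      else recommendations
    let recommendations :=
      if process_blockers ≠ [] then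
        recommendations ++ ["Review and improve processes to resolve " ++ PySem.Int.toStr (process_blockers.length : Int) ++ " process-related blockers"]
      else recommendations
    let recommendations :=
      if communication_blockers ≠ [] then
        recommendations ++ ["Enhance team communication to address " ++ PySem.Int.toStr (communication_blockers.length : Int) ++ " communication issues"]
      else recommendations
    let high_severity := blockers.filter (fun b => pvDget b "severity" == some "high")
    let recommendations :=
      if high_severity ≠ [] then
        recommendations ++ ["Immediate attention required for " ++ PySem.Int.toStr (high_severity.length : Int) ++ " high-severity blockers"]
      else recommendations
    recommendations

-- ===== PORT B =====
-- one step of B's counting loop: bump the matching type counter (if/elif chain) and the high-severity counter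
def pvCountStep (c : Int × Int × Int × Int) (b : List (String × String)) : Int × Int × Int × Int :=
  let t := pvDget b "type"
  let c :=
    if t == some "technical" then (c.1 + 1, c.2.1, c.2.2.1, c.2.2.2)
    else if t == some "process" then (c.1, c.2.1 + 1, c.2.2.1, c.2.2.2)
    else if t == some "communication" then (c.1, c.2.1, c.2.2.1 + 1, c.2.2.2)
    else c
  if pvDget b "severity" == some "high" then (c.1, c.2.1, c.2.2.1, c.2.2.2 + 1) else c

def generate_blocker_recommendations_py_alt (blockers : List (List (String × String))) : List String :=
  if blockers = [] then
    ["No blockers detected. Team communication appears healthy."]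
  else
    let c := blockers.foldl pvCountStep (0, 0, 0, 0)
    (if c.1 ≠ 0 then ["Address " ++ PySem.Int.toStr c.1 ++ " technical blockers through code reviews and pair programming"] else []) ++
    (if c.2.1 ≠ 0 then ["Review and improve processes to resolve " ++ PySem.Int.toStr c.2.1 ++ " process-related blockers"] else []) ++
    (if c.2.2.1 ≠ 0 then ["Enhance team communication to address " ++ PySem.Int.toStr c.2.2.1 ++ " communication issues"] else []) ++
    (if c.2.2.2 ≠ 0 then ["Immediate attention required for " ++ PySem.Int.toStr c.2.2.2 ++ " high-severity blockers"] else [])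

-- ===== PRECONDITION & SPEC =====
def Spec_generate_blocker_recommendations_py (blockers : List (List (String × String))) (out : List String) : Prop := out = generate_blocker_recommendations_py_alt blockers
instance (blockers : List (List (String × String))) (out : List String) : Decidable (Spec_generate_blocker_recommendations_py blockers out) := by unfold Spec_generate_blocker_recommendations_py; infer_instance

-- ===== CLAIM (what is proved, stated in full; the proofs are below) =====
def Claim_equal_generate_blocker_recommendations_py : Prop := ∀ (blockers : List (List (String × String))), Dom_generate_blocker_recommendations_py blockers → Spec_generate_blocker_recommendations_py blockers (generate_blocker_recommendations_py blockers)

-- ===== LEMMAS AND PROOFS =====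

-- 0/1 indicator of a Bool
def pvInd (b : Bool) : Int := if b then 1 else 0

-- one counting step adds the four indicators
theorem pvCountStep_eq (c : Int × Int × Int × Int) (b : List (String × String)) :
    pvCountStep c b =
      (c.1 + pvInd (pvDget b "type" == some "technical"),
       c.2.1 + pvInd (pvDget b "type" == some "process"),
       c.2.2.1 + pvInd (pvDget b "type" == some "communication"),
       c.2.2.2 + pvInd (pvDget b "severity" == some "high")) := by
  rcases c with ⟨t, p, c, h⟩
  unfold pvCountStep pvInd
  split_ifs <;> simp_all

theorem pvLenFilterCons {α : Type} (p : α → Bool) (x : α) (xs : List α) :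
    (((x :: xs).filter p).length : Int) = pvInd (p x) + ((xs.filter p).length : Int) := by
  by_cases h : p x <;> simp [h, pvInd, Int.add_comm]

-- B's fold computes the four filter-counts of A
theorem pvCount_foldl (l : List (List (String × String))) (t p c h : Int) :
    l.foldl pvCountStep (t, p, c, h) =
      (t + ((l.filter (fun b => pvDget b "type" == some "technical")).length : Int),
       p + ((l.filter (fun b => pvDget b "type" == some "process")).length : Int),
       c + ((l.filter (fun b => pvDget b "type" == some "communication")).length : Int),
       h + ((l.filter (fun b => pvDget b "severity" == some "high")).length : Int)) := by
  induction l generalizing t p c h with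
  | nil => simp
  | cons x xs ih =>
    rw [List.foldl_cons, pvCountStep_eq, ih]
    simp only [pvLenFilterCons, add_assoc]

-- A's 'condition → append one string' step equals B's 'condition → emit' step
theorem pvCondAppend (P : Prop) [Decidable P] (s : String) (r : List String) :
    (if P then r ++ [s] else r) = r ++ (if P then [s] else []) := by
  split_ifs <;> simp

-- ===== VERDICT (by name: the statement is the Claim_ definition above) =====
theorem generate_blocker_recommendations_py_spec : Claim_equal_generate_blocker_recommendations_py := by
  intro blockers _
  unfold Spec_generate_blocker_recommendations_py generate_blocker_recommendations_py
    generate_blocker_recommendations_py_alt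
  by_cases hb : blockers = []
  · simp [hb]
  · simp only [if_neg hb, pvCount_foldl, zero_add, ne_eq, Int.natCast_eq_zero,
      List.length_eq_zero_iff, pvCondAppend, List.append_assoc, List.nil_append]
    split_ifs <;> simp
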